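-- pv_equiv track=rewrite | github.com/Popidge/redox | scripts/export_unsloth_dataset.py | extract_iron_signature
-- ===== SOURCE A (Python) =====
-- def extract_iron_signature(iron_code: str, task_id: str) -> str | None:
--     lines = [line.rstrip() for line in iron_code.splitlines()]
--
--     def collect_signature(start_idx: int) -> str | None:
--         sig_lines: list[str] = []
--         for idx in range(start_idx, len(lines)):
--             text = lines[idx].strip()
--             if not text:
--                 continue
--             if text == "begin":
--                 break
--             sig_lines.append(text)
--         if not sig_lines:
--             return None
--         return " | ".join(sig_lines)
--
--     target_prefix = f"function {task_id}"
--     for i, line in enumerate(lines):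
--         if line.strip() == target_prefix:
--             return collect_signature(i)
--
--     for i, line in enumerate(lines):
--         if line.strip().startswith("function "):
--             return collect_signature(i)
--
--     return None
-- ===== SOURCE B (Python) =====
-- def extract_iron_signature(iron_code: str, task_id: str) -> str | None:
--     lines = [line.rstrip() for line in iron_code.splitlines()]
--
--     def collect_signature(start_idx: int) -> str | None:
--         sig_lines: list[str] = []
--         for idx in range(start_idx, len(lines)):
--             text = lines[idx].strip()
--             if not text:
--                 continue
--             if text == "begin":
--                 break
--             sig_lines.append(text)
--         return " | ".join(sig_lines) if sig_lines else None
--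
--     target = f"function {task_id}"
--     fallback = None
--     for i, line in enumerate(lines):
--         text = line.strip()
--         if text == target:
--             return collect_signature(i)
--         if fallback is None and text.startswith("function "):
--             fallback = i
--     return collect_signature(fallback) if fallback is not None else None
-- ===== Notes on version B (the rewrite author's own statement) =====
-- stated objective: simpler
-- what changed: The two separate search loops over the lines are merged into a single pass that returns immediately on an exact 'function <task_id>' match and records the first generic 'function ' line as a fallback index used only after the pass ends.
import Mathlib
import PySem

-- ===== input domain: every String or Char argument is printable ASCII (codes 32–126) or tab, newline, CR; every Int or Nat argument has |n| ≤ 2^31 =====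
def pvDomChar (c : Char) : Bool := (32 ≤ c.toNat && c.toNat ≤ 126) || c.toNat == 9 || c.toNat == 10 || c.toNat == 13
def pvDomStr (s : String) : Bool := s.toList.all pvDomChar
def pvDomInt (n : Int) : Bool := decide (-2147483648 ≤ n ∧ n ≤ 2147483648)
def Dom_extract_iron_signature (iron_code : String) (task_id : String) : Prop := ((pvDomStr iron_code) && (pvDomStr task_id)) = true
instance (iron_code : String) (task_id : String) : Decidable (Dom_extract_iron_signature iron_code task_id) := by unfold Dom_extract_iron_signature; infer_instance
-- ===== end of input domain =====

-- B merges A's two search loops into ONE pass (exact match returns at once; first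
-- generic 'function ' line is kept as a fallback index used only after the pass): simpler.

-- ===== PORT A =====
-- shared helper: Python's inner collect_signature, reading lines from start_idx onward
-- (the Python index loop 'for idx in range(start_idx, len(lines))' is ported as
--  structural recursion over the suffix 'lines.drop start_idx'; same lines in order).
def pvCollectSig (ls : List (List Char)) : List (List Char) :=
  match ls with
  | [] => []
  | l :: rest =>
    let text := PySem.Chars.strip l
    if text = [] then pvCollectSig rest
    else if text = "begin".toList then []
    else text :: pvCollectSig rest

def pvCollectResult (ls : List (List Char)) : Option String :=
  let sigs := pvCollectSig ls
  if sigs = [] then none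
  else some (String.ofList (PySem.Chars.join " | ".toList sigs))

-- A's first loop: index of the first line whose strip equals the target
def pvFindExact (target : List Char) (ls : List (List Char)) (i : Nat) : Option Nat :=
  match ls with
  | [] => none
  | l :: rest =>
    if PySem.Chars.strip l = target then some i
    else pvFindExact target rest (i + 1)

-- A's second loop: index of the first line whose strip starts with "function "
def pvFindFallback (ls : List (List Char)) (i : Nat) : Option Nat :=
  match ls with
  | [] => none
  | l :: rest =>
    if PySem.Chars.startswith (PySem.Chars.strip l) "function ".toList then some i
    else pvFindFallback rest (i + 1)

def extract_iron_signature (iron_code : String) (task_id : String) : Option String :=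
  let lines := (PySem.Chars.splitlines iron_code.toList).map PySem.Chars.rstrip
  let target := "function ".toList ++ task_id.toList
  match pvFindExact target lines 0 with
  | some i => pvCollectResult (lines.drop i)
  | none =>
    match pvFindFallback lines 0 with
    | some i => pvCollectResult (lines.drop i)
    | none => none

-- ===== PORT B =====
-- B's single pass: return the exact-match index at once, carry the first generic
-- 'function ' index as the fallback accumulator, used only when the pass ends.
def pvScanB (target : List Char) (ls : List (List Char)) (i : Nat) (fb : Option Nat) : Option Nat :=
  match ls with
  | [] => fb
  | l :: rest =>
    let text := PySem.Chars.strip l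
    if text = target then some i
    else pvScanB target rest (i + 1)
      (if fb.isNone && PySem.Chars.startswith text "function ".toList then some i else fb)

def extract_iron_signature_alt (iron_code : String) (task_id : String) : Option String :=
  let lines := (PySem.Chars.splitlines iron_code.toList).map PySem.Chars.rstrip
  let target := "function ".toList ++ task_id.toList
  match pvScanB target lines 0 none with
  | some i => pvCollectResult (lines.drop i)
  | none => none

-- ===== PRECONDITION & SPEC =====
def Spec_extract_iron_signature (iron_code : String) (task_id : String) (out : Option String) : Prop := out = extract_iron_signature_alt iron_code task_id
instance (iron_code : String) (task_id : String) (out : Option String) : Decidable (Spec_extract_iron_signature iron_code task_id out) := by unfold Spec_extract_iron_signature; infer_instance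

-- ===== CLAIM (what is proved, stated in full; the proofs are below) =====
def Claim_equal_extract_iron_signature : Prop := ∀ (iron_code : String) (task_id : String), Dom_extract_iron_signature iron_code task_id → Spec_extract_iron_signature iron_code task_id (extract_iron_signature iron_code task_id)

-- ===== LEMMAS AND PROOFS =====

-- B's merged scan = A's exact scan, falling back (on failure) to the carried index
-- or, when none was carried yet, to A's fallback scan over the same suffix.
theorem pvScanB_eq (target : List Char) (ls : List (List Char)) :
    ∀ (i : Nat) (fb : Option Nat),
      pvScanB target ls i fb =
        match pvFindExact target ls i with
        | some j => some j
        | none =>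
          match fb with
          | some k => some k
          | none => pvFindFallback ls i := by
  induction ls with
  | nil => intro i fb; cases fb <;> rfl
  | cons l rest ih =>
    intro i fb
    by_cases hx : PySem.Chars.strip l = target
    · simp [pvScanB, pvFindExact, hx]
    · by_cases hsw : PySem.Chars.startswith (PySem.Chars.strip l) ['f','u','n','c','t','i','o','n',' '] = true
      · cases fb with
        | none =>
          simp [pvScanB, pvFindExact, pvFindFallback, hx, ih]
          cases pvFindExact target rest (i + 1) <;> simp [hsw]
        | some k => simp [pvScanB, pvFindExact, hx, ih]
      · simp only [Bool.not_eq_true] at hsw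
        cases fb with
        | none =>
          simp [pvScanB, pvFindExact, pvFindFallback, hx, hsw, ih]
        | some k => simp [pvScanB, pvFindExact, hx, ih]

-- ===== VERDICT (by name: the statement is the Claim_ definition above) =====
theorem extract_iron_signature_spec : Claim_equal_extract_iron_signature := by
  intro iron_code task_id _
  show extract_iron_signature iron_code task_id = extract_iron_signature_alt iron_code task_id
  unfold extract_iron_signature extract_iron_signature_alt
  simp only [pvScanB_eq]
  cases pvFindExact ("function ".toList ++ task_id.toList)
      ((PySem.Chars.splitlines iron_code.toList).map PySem.Chars.rstrip) 0 with
  | some j => rfl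
  | none =>
    cases pvFindFallback ((PySem.Chars.splitlines iron_code.toList).map PySem.Chars.rstrip) 0 with
    | some k => rfl
    | none => rfl
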